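-- pv_equiv track=rewrite | github.com/barrelblaze/Final-project-careerconnect- | ai/analyzer.py | predict_roles
-- ===== SOURCE A (Python) =====
-- ROLE_MAP = {
--     'backend': {'python', 'java', 'node', 'sql', 'docker', 'aws'},
--     'frontend': {'javascript', 'react', 'html', 'css', 'typescript' },
--     'data_scientist': {'python', 'tensorflow', 'pytorch', 'nlp', 'sql'},
--     'devops': {'aws', 'docker', 'kubernetes', 'linux'},
-- }
--
-- def predict_roles(skills):
--     scores = {}
--     skills_set = set(skills)
--     for role, role_skills in ROLE_MAP.items():
--         inter = skills_set.intersection(role_skills)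
--         if inter:
--             scores[role] = len(inter)
--     # sort roles by matched skill count
--     return [r for r, _ in sorted(scores.items(), key=lambda kv: kv[1], reverse=True)]
-- ===== SOURCE B (Python) =====
-- ROLE_MAP = {
--     'backend': {'python', 'java', 'node', 'sql', 'docker', 'aws'},
--     'frontend': {'javascript', 'react', 'html', 'css', 'typescript' },
--     'data_scientist': {'python', 'tensorflow', 'pytorch', 'nlp', 'sql'},
--     'devops': {'aws', 'docker', 'kubernetes', 'linux'},
-- }
--
-- # inverted index: skill -> roles (in ROLE_MAP order) whose skill set contains it
-- _INDEX = {}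
-- for _role, _skills in ROLE_MAP.items():
--     for _sk in _skills:
--         _INDEX.setdefault(_sk, []).append(_role)
--
--
-- def predict_roles(skills):
--     counts = {}
--     for sk in set(skills):
--         for role in _INDEX.get(sk, ()):
--             counts[role] = counts.get(role, 0) + 1
--     scores = [(role, counts[role]) for role in ROLE_MAP if role in counts]
--     scores.sort(key=lambda kv: kv[1], reverse=True)
--     return [r for r, _ in scores]
-- ===== Notes on version B (the rewrite author's own statement) =====
-- stated objective: alternative
-- what changed: Replaces the per-role set intersections with an inverted skill->roles index built once from ROLE_MAP: one pass over the distinct input skills increments per-role counters, and the score list is assembled in ROLE_MAP order before the same stable reverse sort.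
import Mathlib
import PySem

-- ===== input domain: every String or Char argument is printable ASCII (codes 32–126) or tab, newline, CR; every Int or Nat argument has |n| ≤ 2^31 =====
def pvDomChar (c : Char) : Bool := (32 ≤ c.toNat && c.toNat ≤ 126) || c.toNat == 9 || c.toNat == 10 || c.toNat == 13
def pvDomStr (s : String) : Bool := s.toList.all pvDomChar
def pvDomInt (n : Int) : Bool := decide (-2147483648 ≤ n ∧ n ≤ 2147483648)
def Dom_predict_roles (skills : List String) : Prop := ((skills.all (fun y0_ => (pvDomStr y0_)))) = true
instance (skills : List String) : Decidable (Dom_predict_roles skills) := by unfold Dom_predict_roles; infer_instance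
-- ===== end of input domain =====

-- B replaces A's per-role set intersections by an inverted skill→roles index and one counting
-- pass over the distinct skills (objective: alternative decomposition, same cost).

-- ROLE_MAP (module constant shared by both programs; role skill sets are Python sets)
def pvRoleMap : List (String × PySem.Set String) :=
  [("backend", ["python", "java", "node", "sql", "docker", "aws"]),
   ("frontend", ["javascript", "react", "html", "css", "typescript"]),
   ("data_scientist", ["python", "tensorflow", "pytorch", "nlp", "sql"]),
   ("devops", ["aws", "docker", "kubernetes", "linux"])]

-- ===== PORT A =====
def predict_roles (skills : List String) : List String :=
  let skillsSet : PySem.Set String := PySem.Set.ofList skills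
  let scores : PySem.Dict String Int :=
    pvRoleMap.foldl (fun d rs =>
      let inter := PySem.Set.inter skillsSet rs.2
      if inter.isEmpty then d else d.insert rs.1 (PySem.Set.len inter)) PySem.Dict.empty
  (PySem.List.sorted scores.items (fun kv => kv.2) true).map (fun kv => kv.1)

-- ===== PORT B =====
-- _INDEX: inverted index skill -> roles whose set contains it, built once from ROLE_MAP
def pvIndex : PySem.Dict String (List String) :=
  pvRoleMap.foldl (fun d rs =>
    rs.2.foldl (fun d sk => d.modify sk [] (fun roles => roles ++ [rs.1])) d) PySem.Dict.empty

def predict_roles_alt (skills : List String) : List String :=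
  let counts : PySem.Dict String Int :=
    (PySem.Set.ofList skills).foldl (fun c sk =>
      (pvIndex.getD sk []).foldl (fun c role => c.modify role 0 (· + 1)) c) PySem.Dict.empty
  let scores : List (String × Int) :=
    pvRoleMap.filterMap (fun rs => (counts.get? rs.1).map (fun n => (rs.1, n)))
  (PySem.List.sorted scores (fun kv => kv.2) true).map (fun kv => kv.1)

-- ===== PRECONDITION & SPEC =====
def Spec_predict_roles (skills : List String) (out : List String) : Prop := out = predict_roles_alt skills
instance (skills : List String) (out : List String) : Decidable (Spec_predict_roles skills out) := by unfold Spec_predict_roles; infer_instance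

-- ===== CLAIM (what is proved, stated in full; the proofs are below) =====
def Claim_equal_predict_roles : Prop := ∀ (skills : List String), Dom_predict_roles skills → Spec_predict_roles skills (predict_roles skills)

-- ===== LEMMAS AND PROOFS =====

-- the all-skill key list of the inverted index
def pvAllSkills : List String :=
  ["python", "java", "node", "sql", "docker", "aws", "javascript", "react", "html", "css",
   "typescript", "tensorflow", "pytorch", "nlp", "kubernetes", "linux"]

-- the inverted index, evaluated
theorem pvIndex_eq : pvIndex = PySem.Dict.mk
    [("python", ["backend", "data_scientist"]), ("java", ["backend"]), ("node", ["backend"]),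
     ("sql", ["backend", "data_scientist"]), ("docker", ["backend", "devops"]),
     ("aws", ["backend", "devops"]), ("javascript", ["frontend"]), ("react", ["frontend"]),
     ("html", ["frontend"]), ("css", ["frontend"]), ("typescript", ["frontend"]),
     ("tensorflow", ["data_scientist"]), ("pytorch", ["data_scientist"]), ("nlp", ["data_scientist"]),
     ("kubernetes", ["devops"]), ("linux", ["devops"])] := by decide

theorem pv_getD_not_mem (sk : String) (h : sk ∉ pvAllSkills) : pvIndex.getD sk [] = [] := by
  simp only [pvAllSkills, List.mem_cons, List.not_mem_nil, or_false, not_or] at h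
  obtain ⟨h1, h2, h3, h4, h5, h6, h7, h8, h9, h10, h11, h12, h13, h14, h15, h16⟩ := h
  simp [pvIndex_eq, PySem.Dict.getD_eq_get?_getD, PySem.Dict.get?_mk_cons,
    show (PySem.Dict.mk ([] : List (String × List String))).get? sk = none from rfl,
    Ne.symm h1, Ne.symm h2, Ne.symm h3, Ne.symm h4, Ne.symm h5, Ne.symm h6, Ne.symm h7,
    Ne.symm h8, Ne.symm h9, Ne.symm h10, Ne.symm h11, Ne.symm h12, Ne.symm h13, Ne.symm h14,
    Ne.symm h15, Ne.symm h16]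

-- how many times a given role occurs in a skill's index bucket: 1 iff the skill is in the role's set
theorem pv_bucket_count (r : String) (S : PySem.Set String) (h : (r, S) ∈ pvRoleMap)
    (sk : String) :
    (pvIndex.getD sk []).count r = if PySem.Set.contains S sk then 1 else 0 := by
  by_cases hm : sk ∈ pvAllSkills
  · simp only [pvAllSkills, List.mem_cons, List.not_mem_nil, or_false] at hm
    simp only [pvRoleMap, List.mem_cons, List.not_mem_nil, or_false, Prod.mk.injEq] at h
    rcases h with ⟨rfl, rfl⟩ | ⟨rfl, rfl⟩ | ⟨rfl, rfl⟩ | ⟨rfl, rfl⟩ <;>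
      rcases hm with rfl | rfl | rfl | rfl | rfl | rfl | rfl | rfl | rfl | rfl | rfl | rfl | rfl | rfl | rfl | rfl <;> decide
  · rw [pv_getD_not_mem sk hm]
    simp only [pvAllSkills, List.mem_cons, List.not_mem_nil, or_false, not_or] at hm
    obtain ⟨h1, h2, h3, h4, h5, h6, h7, h8, h9, h10, h11, h12, h13, h14, h15, h16⟩ := hm
    simp only [pvRoleMap, List.mem_cons, List.not_mem_nil, or_false, Prod.mk.injEq] at h
    rcases h with ⟨rfl, rfl⟩ | ⟨rfl, rfl⟩ | ⟨rfl, rfl⟩ | ⟨rfl, rfl⟩ <;>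
      simp [PySem.Set.contains, h1, h2, h3, h4, h5, h6, h7, h8, h9,
        h10, h11, h12, h13, h14, h15, h16]

-- a nested loop over the buckets g x is a loop over the flattened list
theorem pv_foldl_flatMap {α β γ : Type} (g : α → List β) (f : γ → β → γ) :
    ∀ (l : List α) (init : γ),
      l.foldl (fun c x => (g x).foldl f c) init = (l.flatMap g).foldl f init := by
  intro l
  induction l with
  | nil => intro init; rfl
  | cons x xs ih => intro init; simp [List.flatMap_cons, List.foldl_append, ih]

-- B's counts dict is Counter(flatMap of the index buckets)
theorem pv_counts_eq_counter (ds : List String) :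
    ds.foldl (fun c sk =>
        (pvIndex.getD sk []).foldl (fun c role => c.modify role 0 (· + 1)) c) PySem.Dict.empty
      = PySem.Dict.counter (ds.flatMap (fun sk => pvIndex.getD sk [])) := by
  rw [pv_foldl_flatMap]; rfl

-- count of a role over all buckets = number of its skills present in ds
theorem pv_count_flatMap (ds : List String) (r : String) (S : PySem.Set String)
    (h : (r, S) ∈ pvRoleMap) :
    (ds.flatMap (fun sk => pvIndex.getD sk [])).count r
      = (ds.filter (fun sk => PySem.Set.contains S sk)).length := by
  induction ds with
  | nil => rfl
  | cons x xs ih =>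
      simp only [List.flatMap_cons, List.count_append, List.filter_cons, ih,
        pv_bucket_count r S h x]
      split <;> simp <;> omega

-- get? of B's counts at a role name, in terms of A's intersection at that role
theorem pv_counts_get (skills : List String) (r : String) (S : PySem.Set String)
    (h : (r, S) ∈ pvRoleMap) :
    (PySem.Dict.counter ((PySem.Set.ofList skills).flatMap (fun sk => pvIndex.getD sk []))).get? r
      = (if (PySem.Set.inter (PySem.Set.ofList skills) S).isEmpty then none
         else some (PySem.Set.len (PySem.Set.inter (PySem.Set.ofList skills) S))) := by
  have hinter : PySem.Set.inter (PySem.Set.ofList skills) S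
      = (PySem.Set.ofList skills).filter (fun sk => PySem.Set.contains S sk) := rfl
  have hcnt := pv_count_flatMap (PySem.Set.ofList skills) r S h
  by_cases he : (PySem.Set.inter (PySem.Set.ofList skills) S).isEmpty
  · rw [if_pos he]
    rw [PySem.Dict.get?_eq_none_iff_not_mem_keys, PySem.Dict.keys_counter, PySem.Set.mem_ofList]
    intro hr
    have hpos := List.count_pos_iff.mpr hr
    rw [hcnt] at hpos
    rw [hinter, List.isEmpty_iff] at he
    rw [he] at hpos
    simp at hpos
  · rw [if_neg he]
    have hr : r ∈ ((PySem.Set.ofList skills).flatMap (fun sk => pvIndex.getD sk [])) := by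
      rw [← List.count_pos_iff, hcnt, ← hinter]
      rcases List.exists_mem_of_ne_nil _ (by simpa [List.isEmpty_iff] using he) with ⟨y, hy⟩
      exact List.length_pos_of_mem hy
    have hsome : ((PySem.Dict.counter ((PySem.Set.ofList skills).flatMap
        (fun sk => pvIndex.getD sk []))).get? r).isSome := by
      rw [Option.isSome_iff_ne_none]
      intro hn
      rw [PySem.Dict.get?_eq_none_iff_not_mem_keys, PySem.Dict.keys_counter,
        PySem.Set.mem_ofList] at hn
      exact hn hr
    obtain ⟨v, hv⟩ := Option.isSome_iff_exists.mp hsome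
    rw [hv]
    have hgd : (PySem.Dict.counter ((PySem.Set.ofList skills).flatMap
        (fun sk => pvIndex.getD sk []))).getD r 0 = v := PySem.Dict.getD_of_get?_eq_some _ _ hv
    rw [PySem.Dict.getD_counter, hcnt] at hgd
    have hlen : PySem.Set.len (PySem.Set.inter (PySem.Set.ofList skills) S)
        = (((PySem.Set.ofList skills)).filter (fun sk => PySem.Set.contains S sk)).length := by
      rw [hinter]; rfl
    rw [hlen, ← hgd]

-- ===== VERDICT (by name: the statement is the Claim_ definition above) =====
theorem predict_roles_spec : Claim_equal_predict_roles := by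
  intro skills _
  unfold Spec_predict_roles predict_roles predict_roles_alt
  rw [pv_counts_eq_counter]
  have g1 := pv_counts_get skills "backend" ["python", "java", "node", "sql", "docker", "aws"] (by simp [pvRoleMap])
  have g2 := pv_counts_get skills "frontend" ["javascript", "react", "html", "css", "typescript"] (by simp [pvRoleMap])
  have g3 := pv_counts_get skills "data_scientist" ["python", "tensorflow", "pytorch", "nlp", "sql"] (by simp [pvRoleMap])
  have g4 := pv_counts_get skills "devops" ["aws", "docker", "kubernetes", "linux"] (by simp [pvRoleMap])
  simp only [pvRoleMap, List.foldl_cons, List.foldl_nil, List.filterMap_cons, List.filterMap_nil, g1, g2, g3, g4]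
  by_cases e1 : (PySem.Set.inter (PySem.Set.ofList skills) ["python", "java", "node", "sql", "docker", "aws"]).isEmpty <;>
  by_cases e2 : (PySem.Set.inter (PySem.Set.ofList skills) ["javascript", "react", "html", "css", "typescript"]).isEmpty <;>
  by_cases e3 : (PySem.Set.inter (PySem.Set.ofList skills) ["python", "tensorflow", "pytorch", "nlp", "sql"]).isEmpty <;>
  by_cases e4 : (PySem.Set.inter (PySem.Set.ofList skills) ["aws", "docker", "kubernetes", "linux"]).isEmpty <;>
    simp [e1, e2, e3, e4, PySem.Dict.items_insert_of_not_contains, PySem.Dict.contains_insert,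
      show PySem.Dict.empty.items = ([] : List (String × Int)) from rfl]
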